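-- pv_equiv track=rewrite | github.com/wdi2020/wdi_python | cwiczenia2020/Cwiczenia 5/cw03.py | szachuj_
-- ===== SOURCE A (Python) =====
-- def szachuj_(danee):
--     i = 0
--     while i<len(danee):
--         j = i+1
--         while j<len(danee):
--             #wiersz
--             if danee[j][0] == danee[i][0]:
--                 return False
--             #kolumna
--             if danee[j][1] == danee[i][1]:
--                 return False
--             #na skos
--             x = abs(danee[i][0] - danee[j][0])
--             y = abs(danee[i][1] - danee[j][1])
--             if x // y == 1 or x//y == -1:
--                 return False
--             j+=1
--         i+=1
--     return True
-- ===== SOURCE B (Python) =====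
-- def szachuj_(danee):
--     # Single linear pass detects row/column duplicates via sets;
--     # only the near-diagonal test stays pairwise (over shrinking tails).
--     rows = set()
--     cols = set()
--     for pos in danee:
--         r = pos[0]
--         c = pos[1]
--         if r in rows or c in cols:
--             return False
--         rows.add(r)
--         cols.add(c)
--     rest = danee
--     while rest:
--         p, rest = rest[0], rest[1:]
--         for q in rest:
--             x = abs(p[0] - q[0])
--             y = abs(p[1] - q[1])
--             if x // y == 1:
--                 return False
--     return True
-- ===== Notes on version B (the rewrite author's own statement) =====
-- stated objective: alternative
-- what changed: Row/column duplicate detection becomes one linear pass over two sets (replacing A's pairwise equality scans), the remaining pairwise diagonal test iterates over shrinking tails with each position bound once instead of re-indexing danee[i]/danee[j], and A's dead 'x//y == -1' branch (x,y are non-negative with y>0 there) is dropped.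
-- outside the precondition, e.g. on szachuj_([[1]]): A returns True, B raises IndexError; on szachuj_([[1], [1]]): A returns False, B raises IndexError
import Mathlib
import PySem

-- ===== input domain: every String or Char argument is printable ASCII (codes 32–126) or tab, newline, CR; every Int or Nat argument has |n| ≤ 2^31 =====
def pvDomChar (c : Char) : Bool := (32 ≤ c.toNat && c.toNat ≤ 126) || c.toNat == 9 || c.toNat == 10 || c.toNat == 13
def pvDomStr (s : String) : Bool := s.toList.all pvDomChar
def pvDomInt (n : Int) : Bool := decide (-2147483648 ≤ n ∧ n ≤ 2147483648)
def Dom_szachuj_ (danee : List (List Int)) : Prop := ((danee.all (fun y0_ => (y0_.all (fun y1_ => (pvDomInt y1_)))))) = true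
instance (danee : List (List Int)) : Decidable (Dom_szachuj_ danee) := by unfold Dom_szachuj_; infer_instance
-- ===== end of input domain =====

-- B replaces the pairwise row/column equality scans with one linear pass over two sets and
-- drops A's dead 'x//y == -1' branch; proved equal to A on boards whose rows have ≥ 2 entries.


-- ===== PORT A =====
-- Python row[k]; Pre_ guarantees k ∈ {0,1} is in range, so the default 0 is never read
def pvEnt (row : List Int) (k : Nat) : Int := row.getD k 0

-- body of A's inner while-loop for the pair (danee[i], danee[j]): the three checks in order
def pvPairA (a b : List Int) : Bool :=
  if pvEnt b 0 == pvEnt a 0 then false        -- wiersz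
  else if pvEnt b 1 == pvEnt a 1 then false   -- kolumna
  else
    let x := |pvEnt a 0 - pvEnt b 0|
    let y := |pvEnt a 1 - pvEnt b 1|          -- na skos (y ≠ 0 here: kolumna check passed)
    if PySem.Int.floordiv x y == 1 || PySem.Int.floordiv x y == -1 then false else true

-- inner 'while j < len(danee)' loop
def pvLoopJ (danee : List (List Int)) (ai : List Int) (j n : Nat) : Bool :=
  if h : j < n then
    if pvPairA ai (danee.getD j []) then pvLoopJ danee ai (j + 1) n else false
  else true
termination_by n - j

-- outer 'while i < len(danee)' loop
def pvLoopI (danee : List (List Int)) (i n : Nat) : Bool :=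
  if h : i < n then
    if pvLoopJ danee (danee.getD i []) (i + 1) n then pvLoopI danee (i + 1) n else false
  else true
termination_by n - i

def szachuj_ (danee : List (List Int)) : Bool := pvLoopI danee 0 danee.length

-- ===== PORT B =====
-- 'for pos in danee: …' collecting rows/cols into sets, early False on a duplicate
def pvPassRC (l : List (List Int)) (rows cols : PySem.Set Int) : Bool :=
  match l with
  | [] => true
  | pos :: rest =>
    let r := pvEnt pos 0
    let c := pvEnt pos 1
    if PySem.Set.contains rows r || PySem.Set.contains cols c then false
    else pvPassRC rest (PySem.Set.add rows r) (PySem.Set.add cols c)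

-- body of B's inner 'for q in rest' loop
def pvPairB (p q : List Int) : Bool :=
  let x := |pvEnt p 0 - pvEnt q 0|
  let y := |pvEnt p 1 - pvEnt q 1|
  if PySem.Int.floordiv x y == 1 then false else true

-- 'while rest: p, rest = rest[0], rest[1:]; for q in rest: …'
def pvDiag : List (List Int) → Bool
  | [] => true
  | p :: rest => if rest.all (fun q => pvPairB p q) then pvDiag rest else false

def szachuj__alt (danee : List (List Int)) : Bool :=
  if pvPassRC danee PySem.Set.empty PySem.Set.empty then pvDiag danee else false

-- ===== PRECONDITION & SPEC =====
-- Pre_ excludes boards containing a position with fewer than two entries: Python A raises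
-- IndexError on most of them (and on the rest returns an early-exit value B never computes,
-- since B indexes every position in its first pass and raises IndexError there).
def Pre_szachuj_ (danee : List (List Int)) : Prop := ∀ row ∈ danee, 2 ≤ row.length
instance (danee : List (List Int)) : Decidable (Pre_szachuj_ danee) := by unfold Pre_szachuj_; infer_instance

def pvWitness_szachuj_ : List (List Int) := [[0, 0], [1, 3]]

def Spec_szachuj_ (danee : List (List Int)) (out : Bool) : Prop := out = szachuj__alt danee
instance (danee : List (List Int)) (out : Bool) : Decidable (Spec_szachuj_ danee out) := by unfold Spec_szachuj_; infer_instance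

-- ===== CLAIM (what is proved, stated in full; the proofs are below) =====
def Claim_equal_szachuj_ : Prop := ∀ (danee : List (List Int)), Dom_szachuj_ danee → Pre_szachuj_ danee → Spec_szachuj_ danee (szachuj_ danee)

-- ===== LEMMAS AND PROOFS =====

-- the three relations the pair checks decide
def pvR (a b : List Int) : Prop := pvEnt a 0 ≠ pvEnt b 0
def pvC (a b : List Int) : Prop := pvEnt a 1 ≠ pvEnt b 1
def pvDg (a b : List Int) : Prop := pvPairB a b = true

lemma pvPairA_iff (a b : List Int) : pvPairA a b = true ↔ (pvR a b ∧ pvC a b ∧ pvDg a b) := by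
  simp only [pvPairA, pvR, pvC, pvDg]
  by_cases h1 : pvEnt b 0 = pvEnt a 0
  · rw [if_pos (by simpa using h1)]
    constructor
    · intro hf; exact absurd hf (by simp)
    · rintro ⟨hr, -, -⟩; exact absurd h1.symm hr
  · rw [if_neg (by simpa using h1)]
    by_cases h2 : pvEnt b 1 = pvEnt a 1
    · rw [if_pos (by simpa using h2)]
      constructor
      · intro hf; exact absurd hf (by simp)
      · rintro ⟨-, hc, -⟩; exact absurd h2.symm hc
    · rw [if_neg (by simpa using h2)]
      -- the 'x//y == -1' branch is dead: x ≥ 0 and y > 0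
      have hy : (0:Int) < |pvEnt a 1 - pvEnt b 1| := abs_pos.mpr (by omega)
      have hfd : PySem.Int.floordiv |pvEnt a 0 - pvEnt b 0| |pvEnt a 1 - pvEnt b 1| ≠ -1 := by
        have h0 := Int.ediv_nonneg (abs_nonneg (pvEnt a 0 - pvEnt b 0)) (le_of_lt hy)
        rw [PySem.Int.floordiv_eq_ediv_of_pos hy]
        omega
      simp only [pvPairB]
      by_cases h3 : PySem.Int.floordiv |pvEnt a 0 - pvEnt b 0| |pvEnt a 1 - pvEnt b 1| = 1
      · rw [if_pos (by simp [h3]), if_pos (by simpa using h3)]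
        constructor
        · intro hf; exact absurd hf (by simp)
        · rintro ⟨-, -, hd⟩; exact absurd hd (by simp)
      · rw [if_neg (by simp [h3, hfd]), if_neg (by simpa using h3)]
        constructor
        · intro _; exact ⟨fun he => h1 he.symm, fun he => h2 he.symm, rfl⟩
        · intro _; rfl

-- A's inner loop scans indices j..n-1 of danee (n = danee.length)
lemma pvLoopJ_iff (danee : List (List Int)) (ai : List Int) :
    ∀ j, pvLoopJ danee ai j danee.length = true ↔
      ∀ b ∈ danee.drop j, pvPairA ai b = true := by
  intro j
  induction' hfuel : danee.length - j using Nat.strong_induction_on with fuel ih generalizing j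
  rw [pvLoopJ]
  by_cases h : j < danee.length
  · have hdrop : danee.drop j = danee[j] :: danee.drop (j + 1) := List.drop_eq_getElem_cons h
    have hget : danee.getD j [] = danee[j] := List.getD_eq_getElem danee [] h
    simp only [h, dif_pos, hget, hdrop, List.mem_cons]
    by_cases hp : pvPairA ai danee[j] = true
    · rw [if_pos hp, ih (danee.length - (j+1)) (by omega) (j+1) rfl]
      constructor
      · intro hall b hb; rcases hb with rfl | hb
        · exact hp
        · exact hall b hb
      · intro hall b hb; exact hall b (Or.inr hb)
    · rw [if_neg hp]
      constructor
      · intro hf; cases hf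
      · intro hall; exact absurd (hall _ (Or.inl rfl)) hp
  · simp [h, List.drop_eq_nil_of_le (by omega : danee.length ≤ j)]

-- A's outer loop from index i decides Pairwise on the tail danee.drop i
lemma pvLoopI_iff (danee : List (List Int)) :
    ∀ i, pvLoopI danee i danee.length = true ↔
      (danee.drop i).Pairwise (fun a b => pvPairA a b = true) := by
  intro i
  induction' hfuel : danee.length - i using Nat.strong_induction_on with fuel ih generalizing i
  rw [pvLoopI]
  by_cases h : i < danee.length
  · have hdrop : danee.drop i = danee[i] :: danee.drop (i + 1) := List.drop_eq_getElem_cons h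
    have hget : danee.getD i [] = danee[i] := List.getD_eq_getElem danee [] h
    simp only [h, dif_pos, hget, hdrop, List.pairwise_cons]
    by_cases hj : pvLoopJ danee danee[i] (i + 1) danee.length = true
    · rw [if_pos hj, ih (danee.length - (i+1)) (by omega) (i+1) rfl]
      rw [pvLoopJ_iff] at hj
      constructor
      · intro hrec; exact ⟨fun b hb => hj b hb, hrec⟩
      · intro ⟨_, hrec⟩; exact hrec
    · rw [if_neg hj]
      constructor
      · intro hf; cases hf
      · intro ⟨hall, _⟩
        exact absurd ((pvLoopJ_iff danee danee[i] (i+1)).mpr hall) hj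
  · simp [h, List.drop_eq_nil_of_le (by omega : danee.length ≤ i)]

lemma szachuj_iff (danee : List (List Int)) :
    szachuj_ danee = true ↔ danee.Pairwise (fun a b => pvPairA a b = true) := by
  have := pvLoopI_iff danee 0
  simpa [szachuj_] using this

-- B's set pass decides: rows pairwise distinct, cols pairwise distinct, and disjoint
-- from the accumulated sets
lemma pvPassRC_iff (l : List (List Int)) :
    ∀ rows cols : PySem.Set Int,
      pvPassRC l rows cols = true ↔
        (l.Pairwise pvR ∧ l.Pairwise pvC ∧
         (∀ p ∈ l, pvEnt p 0 ∉ rows) ∧ (∀ p ∈ l, pvEnt p 1 ∉ cols)) := by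
  induction l with
  | nil => simp [pvPassRC]
  | cons pos rest ih =>
    intro rows cols
    rw [pvPassRC]
    by_cases hc : (PySem.Set.contains rows (pvEnt pos 0) || PySem.Set.contains cols (pvEnt pos 1)) = true
    · rw [if_pos hc]
      simp only [Bool.or_eq_true, PySem.Set.contains_iff] at hc
      constructor
      · intro hf; exact absurd hf (by simp)
      · rintro ⟨_, _, hr, hcc⟩
        exfalso
        rcases hc with hc | hc
        · exact hr pos List.mem_cons_self hc
        · exact hcc pos List.mem_cons_self hc
    · rw [if_neg hc, ih]
      simp only [Bool.or_eq_true, PySem.Set.contains_iff] at hc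
      simp only [not_or] at hc
      obtain ⟨hr0, hc0⟩ := hc
      simp only [List.pairwise_cons, List.mem_cons, PySem.Set.mem_add]
      constructor
      · rintro ⟨hR, hC, hrows, hcols⟩
        refine ⟨⟨fun b hb => ?_, hR⟩, ⟨fun b hb => ?_, hC⟩, ?_, ?_⟩
        · intro he; exact (hrows b hb) (Or.inr he.symm)
        · intro he; exact (hcols b hb) (Or.inr he.symm)
        · rintro p (rfl | hp)
          · exact hr0
          · intro hm; exact hrows p hp (Or.inl hm)
        · rintro p (rfl | hp)
          · exact hc0
          · intro hm; exact hcols p hp (Or.inl hm)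
      · rintro ⟨⟨hRp, hR⟩, ⟨hCp, hC⟩, hrows, hcols⟩
        refine ⟨hR, hC, fun b hb => ?_, fun b hb => ?_⟩
        · rintro (hm | he)
          · exact hrows b (Or.inr hb) hm
          · exact hRp b hb he.symm
        · rintro (hm | he)
          · exact hcols b (Or.inr hb) hm
          · exact hCp b hb he.symm

lemma pvDiag_iff (l : List (List Int)) :
    pvDiag l = true ↔ l.Pairwise pvDg := by
  induction l with
  | nil => simp [pvDiag]
  | cons p rest ih =>
    rw [pvDiag, List.pairwise_cons]
    by_cases h : rest.all (fun q => pvPairB p q) = true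
    · rw [if_pos h, ih]
      simp only [List.all_eq_true] at h
      constructor
      · intro hr; exact ⟨fun b hb => h b hb, hr⟩
      · intro hr; exact hr.2
    · rw [if_neg h]
      constructor
      · intro hf; exact absurd hf (by simp)
      · intro hr
        exact absurd (List.all_eq_true.mpr fun b hb => hr.1 b hb) h

lemma szachuj_alt_iff (danee : List (List Int)) :
    szachuj__alt danee = true ↔
      (danee.Pairwise pvR ∧ danee.Pairwise pvC ∧ danee.Pairwise pvDg) := by
  unfold szachuj__alt
  by_cases h : pvPassRC danee PySem.Set.empty PySem.Set.empty = true
  · rw [if_pos h, pvDiag_iff]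
    rw [pvPassRC_iff] at h
    obtain ⟨hR, hC, _, _⟩ := h
    exact ⟨fun hd => ⟨hR, hC, hd⟩, fun ⟨_, _, hd⟩ => hd⟩
  · rw [if_neg h]
    constructor
    · intro hf; exact absurd hf (by simp)
    · rintro ⟨hR, hC, _⟩
      exfalso
      apply h
      rw [pvPassRC_iff]
      refine ⟨hR, hC, ?_, ?_⟩ <;> · intro p _ hm; simp [PySem.Set.empty] at hm

-- ===== VERDICT (by name: the statement is the Claim_ definition above) =====
theorem szachuj__spec : Claim_equal_szachuj_ := by
  intro danee _ _
  unfold Spec_szachuj_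
  rw [Bool.eq_iff_iff, szachuj_iff, szachuj_alt_iff]
  constructor
  · intro h
    exact ⟨h.imp (fun hp => ((pvPairA_iff _ _).mp hp).1),
           h.imp (fun hp => ((pvPairA_iff _ _).mp hp).2.1),
           h.imp (fun hp => ((pvPairA_iff _ _).mp hp).2.2)⟩
  · rintro ⟨hR, hC, hD⟩
    have := (hR.and hC).and hD
    exact this.imp fun ⟨⟨h1, h2⟩, h3⟩ => (pvPairA_iff _ _).mpr ⟨h1, h2, h3⟩
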